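-- pv_equiv track=rewrite | github.com/frontloss/GPU_Validation_Infrastructure | DisplayAutomation2.0/Tests/PowerCons/Modules/windows_brightness.py | __parse_power_cfg_info
-- ===== SOURCE A (Python) =====
-- def __parse_power_cfg_info(power_cfg_query_output):
--     output_list = []
--     output_dict = dict()
--
--     for line in power_cfg_query_output.splitlines():
--         if ":" in line:
--             row = line.split(":")
--             if len(row) == 2:
--                 key = row[0].strip()
--                 value = row[1].strip()
--
--                 if key in output_dict.keys():
--                     output_list.append(output_dict)
--                     output_dict = dict()
--
--                 output_dict[key] = value
--     if len(output_dict.keys()):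
--         output_list.append(output_dict)
--     return output_list
-- ===== SOURCE B (Python) =====
-- def __parse_power_cfg_info(power_cfg_query_output):
--     # phase 1: extract stripped (key, value) pairs from lines that split on ":" into exactly two parts
--     pairs = []
--     for line in power_cfg_query_output.splitlines():
--         row = line.split(":")
--         if len(row) == 2:
--             pairs.append((row[0].strip(), row[1].strip()))
--     # phase 2: cut the pair stream into maximal runs of distinct keys (two pointers),
--     # each run becomes one record
--     records = []
--     i = 0
--     n = len(pairs)
--     while i < n:
--         seen = set()
--         j = i
--         while j < n and pairs[j][0] not in seen:
--             seen.add(pairs[j][0])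
--             j += 1
--         records.append(dict(pairs[i:j]))
--         i = j
--     return records
-- ===== Notes on version B (the rewrite author's own statement) =====
-- stated objective: alternative
-- what changed: A's single fused loop (dict with flush-on-duplicate inside the line loop) is split into two phases: a pass that extracts stripped (key, value) pairs from lines splitting into exactly two parts (dropping A's redundant ':' membership test), then a two-pointer pass that cuts the pair stream into maximal runs of distinct keys, each run becoming one record.
import Mathlib
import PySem

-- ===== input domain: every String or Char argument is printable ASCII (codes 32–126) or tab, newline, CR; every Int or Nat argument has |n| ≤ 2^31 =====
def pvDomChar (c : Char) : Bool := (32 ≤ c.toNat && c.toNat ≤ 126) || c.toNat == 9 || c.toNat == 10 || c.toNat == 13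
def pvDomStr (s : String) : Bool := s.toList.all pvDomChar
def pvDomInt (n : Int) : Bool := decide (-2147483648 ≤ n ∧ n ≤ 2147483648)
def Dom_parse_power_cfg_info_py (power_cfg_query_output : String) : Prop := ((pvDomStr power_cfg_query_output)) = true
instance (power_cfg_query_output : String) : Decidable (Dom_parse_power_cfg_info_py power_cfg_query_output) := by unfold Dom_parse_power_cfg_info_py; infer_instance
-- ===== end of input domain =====

-- B re-decomposes A's fused loop into two phases (extract stripped key/value pairs, then cut the
-- pair stream into maximal distinct-key runs); same return value on every input ('alternative').

-- ===== PORT A =====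
-- loop body of A's single fused 'for line in …' loop
def pvLoopA (st : List (List (String × String)) × PySem.Dict String String) (line : String) :
    List (List (String × String)) × PySem.Dict String String :=
  if PySem.Str.isIn ":" line then
    match (PySem.Str.split? line ":").getD [] with
    | [r0, r1] =>
        let key := PySem.Str.strip r0
        let value := PySem.Str.strip r1
        let st' := if st.2.contains key then (st.1 ++ [st.2.items], PySem.Dict.empty) else st
        (st'.1, st'.2.insert key value)
    | _ => st
  else st

def parse_power_cfg_info_py (power_cfg_query_output : String) : List (List (String × String)) :=
  let st := (PySem.Str.splitlines power_cfg_query_output).foldl pvLoopA ([], PySem.Dict.empty)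
  if st.2.items.length ≠ 0 then st.1 ++ [st.2.items] else st.1

-- ===== PORT B =====
-- phase-1 loop body: collect a stripped (key, value) pair from a line that splits into exactly two parts
def pvLoopB (acc : List (String × String)) (line : String) : List (String × String) :=
  match (PySem.Str.split? line ":").getD [] with
  | [r0, r1] => acc ++ [(PySem.Str.strip r0, PySem.Str.strip r1)]
  | _ => acc

-- phase-2 inner 'while' loop: consume pairs while the key is unseen (returns the run and the rest)
def pvTakeRun (seen : PySem.Set String) :
    List (String × String) → List (String × String) × List (String × String)
  | [] => ([], [])
  | p :: rest =>
    if PySem.Set.contains seen p.1 then ([], p :: rest)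
    else
      let gr := pvTakeRun (PySem.Set.add seen p.1) rest
      (p :: gr.1, gr.2)

theorem pvTakeRun_snd_length_le (seen : PySem.Set String) (l : List (String × String)) :
    (pvTakeRun seen l).2.length ≤ l.length := by
  induction l generalizing seen with
  | nil => simp [pvTakeRun]
  | cons p rest ih =>
      simp only [pvTakeRun]
      split
      · simp
      · exact Nat.le_succ_of_le (ih _)

-- phase-2 outer 'while' loop: cut the pair stream into maximal runs of distinct keys
def pvGroup : List (String × String) → List (List (String × String))
  | [] => []
  | p :: rest =>
      (p :: (pvTakeRun (PySem.Set.add PySem.Set.empty p.1) rest).1)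
        :: pvGroup (pvTakeRun (PySem.Set.add PySem.Set.empty p.1) rest).2
  termination_by l => l.length
  decreasing_by
    exact Nat.lt_succ_of_le (pvTakeRun_snd_length_le _ _)

def parse_power_cfg_info_py_alt (power_cfg_query_output : String) : List (List (String × String)) :=
  let pairs := (PySem.Str.splitlines power_cfg_query_output).foldl pvLoopB []
  (pvGroup pairs).map (fun run => (PySem.Dict.ofList run).items)

-- ===== PRECONDITION & SPEC =====
def Spec_parse_power_cfg_info_py (power_cfg_query_output : String) (out : List (List (String × String))) : Prop := out = parse_power_cfg_info_py_alt power_cfg_query_output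
instance (power_cfg_query_output : String) (out : List (List (String × String))) : Decidable (Spec_parse_power_cfg_info_py power_cfg_query_output out) := by unfold Spec_parse_power_cfg_info_py; infer_instance

-- ===== CLAIM (what is proved, stated in full; the proofs are below) =====
def Claim_equal_parse_power_cfg_info_py : Prop := ∀ (power_cfg_query_output : String), Dom_parse_power_cfg_info_py power_cfg_query_output → Spec_parse_power_cfg_info_py power_cfg_query_output (parse_power_cfg_info_py power_cfg_query_output)

-- ===== LEMMAS AND PROOFS =====

-- what one line contributes (none = skipped line)
def pvExtract (line : String) : Option (String × String) :=
  match (PySem.Str.split? line ":").getD [] with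
  | [r0, r1] => some (PySem.Str.strip r0, PySem.Str.strip r1)
  | _ => none

-- A's loop body at pair level
def pvStepP (st : List (List (String × String)) × PySem.Dict String String) (p : String × String) :
    List (List (String × String)) × PySem.Dict String String :=
  if st.2.contains p.1 then (st.1 ++ [st.2.items], PySem.Dict.empty.insert p.1 p.2)
  else (st.1, st.2.insert p.1 p.2)

def pvFin (st : List (List (String × String)) × PySem.Dict String String) :
    List (List (String × String)) :=
  if st.2.items.length ≠ 0 then st.1 ++ [st.2.items] else st.1

-- A's grouping continuation, current record 'run'
def pvContGroup (run : List (String × String)) :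
    List (String × String) → List (List (String × String))
  | [] => [run]
  | p :: ps =>
      if (run.map Prod.fst).contains p.1 then run :: pvContGroup [p] ps
      else pvContGroup (run ++ [p]) ps

theorem pvSplitOnGo_of_not_infix (sep : List Char) (fuel : Nat) (l cur : List Char)
    (acc : List (List Char)) (h : ¬ sep <:+: l) :
    PySem.Chars.splitOn.go sep fuel l cur acc = ((cur.reverse ++ l) :: acc).reverse := by
  induction fuel generalizing l cur with
  | zero => simp [PySem.Chars.splitOn.go]
  | succ n ih =>
      cases l with
      | nil => simp [PySem.Chars.splitOn.go]
      | cons c rest =>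
          have hpre : sep.isPrefixOf (c :: rest) = false := by
            cases hp : sep.isPrefixOf (c :: rest) with
            | false => rfl
            | true => exact absurd ((List.isPrefixOf_iff_prefix.mp hp).isInfix) h
          have hrest : ¬ sep <:+: rest := fun hx => h (List.infix_cons hx)
          rw [PySem.Chars.splitOn.go, if_neg (by simp [hpre]), ih rest (c :: cur) hrest]
          simp

theorem pvSplit_no_colon (line : String) (h : PySem.Str.isIn ":" line = false) :
    (PySem.Str.split? line ":").getD [] = [line] := by
  have hinf : ¬ (":".toList) <:+: line.toList :=
    (PySem.Chars.isIn_eq_false_iff ":".toList line.toList).mp (by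
      simpa [PySem.Str.isIn] using h)
  simp only [PySem.Str.split?, PySem.Chars.split?, PySem.Chars.splitOn]
  rw [if_neg (by simp)]
  rw [pvSplitOnGo_of_not_infix _ _ _ _ _ hinf]
  simp [String.ofList_toList]

theorem pvLoopA_eq (st : List (List (String × String)) × PySem.Dict String String)
    (line : String) :
    pvLoopA st line = match pvExtract line with
      | some p => pvStepP st p
      | none => st := by
  unfold pvLoopA pvExtract pvStepP
  cases hin : PySem.Str.isIn ":" line with
  | false => rw [pvSplit_no_colon line hin]; rfl
  | true =>
      rcases hrow : (PySem.Str.split? line ":").getD [] with _ | ⟨r0, _ | ⟨r1, _ | _⟩⟩ <;>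
        first
          | rfl
          | (cases hcc : st.2.contains (PySem.Str.strip r0) <;> simp only [hcc] <;> rfl)

theorem pvLoopB_eq (acc : List (String × String)) (line : String) :
    pvLoopB acc line = match pvExtract line with
      | some p => acc ++ [p]
      | none => acc := by
  unfold pvLoopB pvExtract
  rcases hrow : (PySem.Str.split? line ":").getD [] with _ | ⟨r0, _ | ⟨r1, _ | _⟩⟩ <;> rfl

theorem pvFoldA_eq (lines : List String)
    (st : List (List (String × String)) × PySem.Dict String String) :
    lines.foldl pvLoopA st = (lines.filterMap pvExtract).foldl pvStepP st := by
  induction lines generalizing st with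
  | nil => rfl
  | cons line rest ih =>
      rw [List.foldl_cons, ih, List.filterMap_cons, pvLoopA_eq]
      cases pvExtract line <;> simp

theorem pvFoldB_eq (lines : List String) (acc : List (String × String)) :
    lines.foldl pvLoopB acc = acc ++ lines.filterMap pvExtract := by
  induction lines generalizing acc with
  | nil => simp
  | cons line rest ih =>
      rw [List.foldl_cons, ih, List.filterMap_cons, pvLoopB_eq]
      cases pvExtract line <;> simp

theorem pvContains_eq (run : List (String × String)) (k : String) :
    (PySem.Dict.mk run).contains k = (run.map Prod.fst).contains k := by
  rw [Bool.eq_iff_iff, List.contains_iff_mem]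
  simp [PySem.Dict.contains]

theorem pvInsert_fresh (run : List (String × String)) (p : String × String)
    (h : (run.map Prod.fst).contains p.1 = false) :
    (PySem.Dict.mk run).insert p.1 p.2 = PySem.Dict.mk (run ++ [p]) := by
  rw [PySem.Dict.insert, if_neg (by rw [pvContains_eq, h]; simp)]

theorem pvL1 (ps : List (String × String)) (acc : List (List (String × String)))
    (run : List (String × String)) (hnd : (run.map Prod.fst).Nodup) (hne : run ≠ []) :
    pvFin (ps.foldl pvStepP (acc, PySem.Dict.mk run)) = acc ++ pvContGroup run ps := by
  induction ps generalizing acc run with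
  | nil =>
      have : run.length ≠ 0 := fun hx => hne (List.length_eq_zero_iff.mp hx)
      simp [pvFin, pvContGroup, this]
  | cons p ps ih =>
      rw [List.foldl_cons]
      cases hc : (run.map Prod.fst).contains p.1 with
      | true =>
          have h1 : (PySem.Dict.mk run).contains p.1 = true := by rw [pvContains_eq]; exact hc
          have hstep : pvStepP (acc, PySem.Dict.mk run) p = (acc ++ [run], PySem.Dict.mk [p]) := by
            unfold pvStepP
            rw [if_pos h1]
            rfl
          rw [hstep, ih (acc ++ [run]) [p] (by simp) (by simp)]
          rw [pvContGroup, if_pos hc]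
          simp
      | false =>
          have h1 : (PySem.Dict.mk run).contains p.1 = false := by rw [pvContains_eq]; exact hc
          have hstep : pvStepP (acc, PySem.Dict.mk run) p = (acc, PySem.Dict.mk (run ++ [p])) := by
            unfold pvStepP
            rw [if_neg (by rw [h1]; simp)]
            rw [show (acc, PySem.Dict.mk run).2.insert p.1 p.2 = PySem.Dict.mk (run ++ [p]) from
              pvInsert_fresh run p hc]
          have hnm : p.1 ∉ run.map Prod.fst := fun hx =>
            absurd (List.contains_iff_mem.mpr hx) (by rw [hc]; simp)
          have hnd' : ((run ++ [p]).map Prod.fst).Nodup := by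
            simp only [List.map_append, List.map_cons, List.map_nil]
            exact List.Nodup.append hnd (List.nodup_singleton _)
              (by intro a ha hb; simp at hb; exact hnm (hb ▸ ha))
          rw [hstep, ih acc (run ++ [p]) hnd' (by simp)]
          rw [pvContGroup, if_neg (by rw [hc]; simp)]

theorem pvAddEmpty (k : String) : PySem.Set.add PySem.Set.empty k = [k] := by
  simp [PySem.Set.add, PySem.Set.contains, PySem.Set.empty]

theorem pvGroup_cons (p : String × String) (rest : List (String × String)) :
    pvGroup (p :: rest)
      = (p :: (pvTakeRun [p.1] rest).1) :: pvGroup (pvTakeRun [p.1] rest).2 := by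
  rw [pvGroup, pvAddEmpty]

theorem pvL2 (ps run : List (String × String)) (hne : run ≠ []) :
    pvContGroup run ps
      = (run ++ (pvTakeRun (run.map Prod.fst) ps).1)
        :: pvGroup (pvTakeRun (run.map Prod.fst) ps).2 := by
  induction ps generalizing run with
  | nil => simp [pvContGroup, pvTakeRun, pvGroup]
  | cons p ps ih =>
      cases hc : (run.map Prod.fst).contains p.1 with
      | true =>
          have hseen : PySem.Set.contains (run.map Prod.fst) p.1 = true := hc
          rw [pvContGroup, if_pos hc, ih [p] (by simp)]
          rw [show pvTakeRun (run.map Prod.fst) (p :: ps) = ([], p :: ps) by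
            rw [pvTakeRun, if_pos hseen]]
          rw [pvGroup_cons]
          simp
      | false =>
          have hseen : PySem.Set.contains (run.map Prod.fst) p.1 = false := hc
          have hadd : PySem.Set.add (run.map Prod.fst) p.1 = (run ++ [p]).map Prod.fst := by
            rw [PySem.Set.add, if_neg (by rw [hseen]; simp)]
            simp
          rw [pvContGroup, if_neg (by rw [hc]; simp), ih (run ++ [p]) (by simp)]
          rw [show pvTakeRun (run.map Prod.fst) (p :: ps)
              = (p :: (pvTakeRun ((run ++ [p]).map Prod.fst) ps).1,
                 (pvTakeRun ((run ++ [p]).map Prod.fst) ps).2) by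
            rw [pvTakeRun, if_neg (by rw [hseen]; simp), hadd]]
          simp

theorem pvSeenNodup (l : List (String × String)) (seen : PySem.Set String)
    (h : seen.Nodup) : (seen ++ (pvTakeRun seen l).1.map Prod.fst).Nodup := by
  induction l generalizing seen with
  | nil => simpa [pvTakeRun]
  | cons p rest ih =>
      rw [pvTakeRun]
      cases hc : PySem.Set.contains seen p.1 with
      | true => simpa [hc]
      | false =>
          rw [if_neg (by simp)]
          have hcc : PySem.Set.contains seen p.1 = false := hc
          have hnm : p.1 ∉ seen := fun hx =>
            absurd (List.contains_iff_mem.mpr hx) (by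
              rw [show List.contains seen p.1 = false from hcc]; simp)
          have hadd : PySem.Set.add seen p.1 = seen ++ [p.1] := by
            rw [PySem.Set.add, if_neg (by rw [hcc]; simp)]
          have hnd : (seen ++ [p.1]).Nodup :=
            List.Nodup.append h (List.nodup_singleton _)
              (by intro a ha hb; simp at hb; exact hnm (hb ▸ ha))
          rw [hadd]
          simpa using ih (seen ++ [p.1]) hnd

theorem pvGroupNodup (ps : List (String × String)) (g : List (String × String))
    (hg : g ∈ pvGroup ps) : (g.map Prod.fst).Nodup := by
  induction ps using pvGroup.induct with
  | case1 => simp [pvGroup] at hg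
  | case2 p rest ih =>
      rw [pvGroup_cons] at hg
      rcases List.mem_cons.mp hg with h | h
      · subst h
        have := pvSeenNodup rest [p.1] (List.nodup_singleton _)
        simpa using this
      · exact ih (by rw [pvAddEmpty]; exact h)

theorem pvUpdateItems (g : List (String × String)) (d : PySem.Dict String String)
    (h : (d.items.map Prod.fst ++ g.map Prod.fst).Nodup) :
    (d.update g).items = d.items ++ g := by
  induction g generalizing d with
  | nil => simp [PySem.Dict.update]
  | cons p rest ih =>
      have hnm : p.1 ∉ d.items.map Prod.fst := fun hx =>
        (List.disjoint_of_nodup_append h) hx (by simp)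
      have hfree : (d.items.map Prod.fst).contains p.1 = false := by
        cases hq : (d.items.map Prod.fst).contains p.1 with
        | false => rfl
        | true => exact absurd (List.contains_iff_mem.mp hq) hnm
      have hins : d.insert p.1 p.2 = PySem.Dict.mk (d.items ++ [p]) := pvInsert_fresh d.items p hfree
      rw [PySem.Dict.update, List.foldl_cons, hins]
      have h' : ((PySem.Dict.mk (d.items ++ [p])).items.map Prod.fst ++ rest.map Prod.fst).Nodup := by
        simpa using h
      have := ih (PySem.Dict.mk (d.items ++ [p])) h'
      rw [PySem.Dict.update] at this
      rw [this]
      simp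

theorem pvOfListItems (g : List (String × String)) (h : (g.map Prod.fst).Nodup) :
    (PySem.Dict.ofList g).items = g := by
  rw [PySem.Dict.ofList]
  have := pvUpdateItems g PySem.Dict.empty (by simpa [PySem.Dict.empty])
  simpa [PySem.Dict.empty] using this

theorem pvA_eq_group (s : String) :
    parse_power_cfg_info_py s
      = pvGroup ((PySem.Str.splitlines s).filterMap pvExtract) := by
  unfold parse_power_cfg_info_py
  rw [show ((PySem.Str.splitlines s).foldl pvLoopA ([], PySem.Dict.empty))
      = ((PySem.Str.splitlines s).filterMap pvExtract).foldl pvStepP ([], PySem.Dict.empty)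
    from pvFoldA_eq _ _]
  rcases hp : (PySem.Str.splitlines s).filterMap pvExtract with _ | ⟨p, ps⟩
  · simp [PySem.Dict.empty, pvGroup]
  · rw [List.foldl_cons]
    have hstep : pvStepP ([], PySem.Dict.empty) p = ([], PySem.Dict.mk [p]) := rfl
    have hfin : pvFin (ps.foldl pvStepP ([], PySem.Dict.mk [p]))
        = [] ++ pvContGroup [p] ps := pvL1 ps [] [p] (by simp) (by simp)
    have hsh : (if (ps.foldl pvStepP ([], PySem.Dict.mk [p])).2.items.length ≠ 0
        then (ps.foldl pvStepP ([], PySem.Dict.mk [p])).1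
          ++ [(ps.foldl pvStepP ([], PySem.Dict.mk [p])).2.items]
        else (ps.foldl pvStepP ([], PySem.Dict.mk [p])).1)
        = pvFin (ps.foldl pvStepP ([], PySem.Dict.mk [p])) := rfl
    rw [hstep, hsh, hfin, pvL2 ps [p] (by simp), pvGroup_cons]
    simp

theorem pvB_eq_group (s : String) :
    parse_power_cfg_info_py_alt s
      = pvGroup ((PySem.Str.splitlines s).filterMap pvExtract) := by
  unfold parse_power_cfg_info_py_alt
  rw [pvFoldB_eq]
  simp only [List.nil_append]
  rw [List.map_congr_left (fun g hg => pvOfListItems g (pvGroupNodup _ g hg))]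
  simp

-- ===== VERDICT (by name: the statement is the Claim_ definition above) =====
theorem parse_power_cfg_info_py_spec : Claim_equal_parse_power_cfg_info_py := by
  intro s _
  unfold Spec_parse_power_cfg_info_py
  rw [pvA_eq_group, pvB_eq_group]
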